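-- pv_equiv track=rewrite | github.com/francobramucci/LCC | Programacion_II/Python/practica3.py | countWordsLongerThan
-- ===== SOURCE A (Python) =====
-- def countWordsLongerThan(s):
--     cont = 0
--     res = 0
--     for i in range(len(s)):
--         if s[i] == ' ' :
--             if cont > 5:
--                 res += 1
--             cont = 0
--         else:
--             cont += 1
--     if cont > 5:
--         res += 1
--     return res
-- ===== SOURCE B (Python) =====
-- def countWordsLongerThan(s):
--     return sum(1 for w in s.split(' ') if len(w) > 5)
-- ===== Notes on version B (the rewrite author's own statement) =====
-- stated objective: idiomatic
-- what changed: Replaces the char-by-char run-length counter with splitting on single spaces and counting the resulting words of length > 5 in one comprehension.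
import Mathlib
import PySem

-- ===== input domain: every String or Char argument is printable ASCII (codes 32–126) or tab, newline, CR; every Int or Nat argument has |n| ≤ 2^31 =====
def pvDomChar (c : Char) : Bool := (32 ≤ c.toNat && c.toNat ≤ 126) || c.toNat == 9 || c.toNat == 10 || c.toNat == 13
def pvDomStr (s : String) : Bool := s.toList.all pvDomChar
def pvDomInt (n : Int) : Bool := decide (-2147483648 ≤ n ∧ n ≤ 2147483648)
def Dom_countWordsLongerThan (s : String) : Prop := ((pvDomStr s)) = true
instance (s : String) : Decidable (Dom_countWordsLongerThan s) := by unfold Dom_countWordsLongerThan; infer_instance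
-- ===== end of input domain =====

-- B replaces A's char-by-char run-length counter by split-on-space then count words of length > 5 (idiomatic, same cost).
-- ===== PORT A =====
-- the for-loop over s's characters with state (cont, res); the trailing `if cont > 5` finishes it
def countWordsLongerThan (s : String) : Int :=
  let st := s.toList.foldl
    (fun (p : Int × Int) c =>
      if c = ' ' then (0, if p.1 > 5 then p.2 + 1 else p.2) else (p.1 + 1, p.2))
    (0, 0)
  if st.1 > 5 then st.2 + 1 else st.2

-- ===== PORT B =====
-- s.split(' ') → PySem.Chars.splitOn; sum(1 for w in … if len(w) > 5)
def countWordsLongerThan_alt (s : String) : Int :=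
  ((PySem.Chars.splitOn s.toList " ".toList).map
    (fun w => if 5 < (w.length : Int) then (1 : Int) else 0)).sum

-- ===== PRECONDITION & SPEC =====
def Spec_countWordsLongerThan (s : String) (out : Int) : Prop := out = countWordsLongerThan_alt s
instance (s : String) (out : Int) : Decidable (Spec_countWordsLongerThan s out) := by unfold Spec_countWordsLongerThan; infer_instance

-- ===== CLAIM (what is proved, stated in full; the proofs are below) =====
def Claim_equal_countWordsLongerThan : Prop := ∀ (s : String), Dom_countWordsLongerThan s → Spec_countWordsLongerThan s (countWordsLongerThan s)

-- ===== LEMMAS AND PROOFS =====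

-- the words of l when splitting on a single space, recursively
def pvW : List Char → List (List Char)
  | [] => [[]]
  | c :: r => if c = ' ' then [] :: pvW r
              else match pvW r with
                   | [] => [[c]]
                   | h :: t => (c :: h) :: t

-- prepend p to the first word
def pvConsHead (p : List Char) : List (List Char) → List (List Char)
  | [] => [p]
  | h :: t => (p ++ h) :: t

lemma pvW_ne_nil (l : List Char) : pvW l ≠ [] := by
  cases l with
  | nil => simp [pvW]
  | cons c r =>
    simp only [pvW]
    split
    · simp
    · split <;> simp

lemma pvConsHead_nil_of_ne (ws : List (List Char)) (h : ws ≠ []) :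
    pvConsHead [] ws = ws := by
  cases ws with
  | nil => exact absurd rfl h
  | cons a t => simp [pvConsHead]

lemma pv_go_eq (fuel : Nat) : ∀ (l cur : List Char) (accs : List (List Char)),
    l.length ≤ fuel →
    PySem.Chars.splitOn.go [' '] fuel l cur accs = accs.reverse ++ pvConsHead cur.reverse (pvW l) := by
  induction fuel with
  | zero =>
    intro l cur accs h
    have hl : l = [] := List.eq_nil_of_length_eq_zero (Nat.le_zero.mp h)
    subst hl
    simp [PySem.Chars.splitOn.go, pvW, pvConsHead]
  | succ n ih =>
    intro l cur accs h
    cases l with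
    | nil => simp [PySem.Chars.splitOn.go, pvW, pvConsHead]
    | cons c r =>
      rw [PySem.Chars.splitOn.go]
      by_cases hc : c = ' '
      · subst hc
        have hpre : [' '].isPrefixOf (' ' :: r) = true := by simp [List.isPrefixOf]
        simp only [hpre, if_pos, List.length_singleton, List.drop_succ_cons, List.drop_zero]
        rw [ih r [] (cur.reverse :: accs) (by simpa using h)]
        simp only [List.reverse_nil]
        rw [pvConsHead_nil_of_ne _ (pvW_ne_nil r)]
        show (cur.reverse :: accs).reverse ++ pvW r = accs.reverse ++ pvConsHead cur.reverse (pvW (' ' :: r))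
        have : pvW (' ' :: r) = [] :: pvW r := by simp [pvW]
        rw [this]
        simp [pvConsHead]
      · have hpre : [' '].isPrefixOf (c :: r) = false := by
          simp only [List.isPrefixOf, Bool.and_true, beq_eq_false_iff_ne, ne_eq]
          exact fun h => hc h.symm
        simp only [hpre, Bool.false_eq_true, if_false]
        rw [ih r (c :: cur) accs (by simpa using h)]
        have : pvW (c :: r) = match pvW r with
            | [] => [[c]]
            | h :: t => (c :: h) :: t := by simp [pvW, hc]
        rw [this]
        cases hw : pvW r with
        | nil => exact absurd hw (pvW_ne_nil r)
        | cons h t => simp [pvConsHead]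

lemma pv_splitOn_eq (l : List Char) :
    PySem.Chars.splitOn l [' '] = pvW l := by
  rw [PySem.Chars.splitOn, pv_go_eq (l.length + 1) l [] [] (by omega)]
  simpa using pvConsHead_nil_of_ne _ (pvW_ne_nil l)

-- A's loop, expressed as direct recursion on the remaining characters with current run length `cont`
def pvCnt (cont : Int) : List Char → Int
  | [] => if cont > 5 then 1 else 0
  | c :: r => if c = ' ' then (if cont > 5 then 1 else 0) + pvCnt 0 r
              else pvCnt (cont + 1) r

lemma pvCnt_eq_foldl (l : List Char) : ∀ (cont res : Int),
    (let st := l.foldl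
        (fun (p : Int × Int) c =>
          if c = ' ' then (0, if p.1 > 5 then p.2 + 1 else p.2) else (p.1 + 1, p.2))
        (cont, res);
      if st.1 > 5 then st.2 + 1 else st.2) = res + pvCnt cont l := by
  induction l with
  | nil => intro cont res; simp only [List.foldl_nil, pvCnt]; split_ifs <;> ring
  | cons c r ih =>
    intro cont res
    simp only [List.foldl_cons, pvCnt]
    by_cases hc : c = ' '
    · subst hc
      
      rw [ih]
      split_ifs <;> ring
    · simp only [hc, if_false]
      rw [ih]

lemma pvCnt_eq_sum (l : List Char) : ∀ (cont : Int), 0 ≤ cont →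
    pvCnt cont l =
      (if 5 < cont + (((pvW l).headI).length : Int) then 1 else 0) +
        (((pvW l).tail).map (fun w => if 5 < (w.length : Int) then (1 : Int) else 0)).sum := by
  induction l with
  | nil => intro cont _; simp [pvCnt, pvW]
  | cons c r ih =>
    intro cont hcont
    by_cases hc : c = ' '
    · subst hc
      have hW : pvW (' ' :: r) = [] :: pvW r := by simp [pvW]
      rw [hW]
      simp only [List.headI_cons, List.tail_cons, List.length_nil, Nat.cast_zero, add_zero]
      have := ih 0 le_rfl
      cases hw : pvW r with
      | nil => exact absurd hw (pvW_ne_nil r)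
      | cons h t =>
        rw [hw] at this
        simp only [List.headI_cons, List.tail_cons, zero_add] at this
        simp only [pvCnt, this, List.map_cons, List.sum_cons]
        simp [gt_iff_lt]
    · have hrec : pvCnt cont (c :: r) = pvCnt (cont + 1) r := by simp [pvCnt, hc]
      cases hw : pvW r with
      | nil => exact absurd hw (pvW_ne_nil r)
      | cons h t =>
        have hW : pvW (c :: r) = (c :: h) :: t := by simp [pvW, hc, hw]
        rw [hrec, ih (cont + 1) (by omega), hw, hW]
        simp only [List.headI_cons, List.tail_cons, List.length_cons]
        push_cast
        ring_nf

-- ===== VERDICT (by name: the statement is the Claim_ definition above) =====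
theorem countWordsLongerThan_spec : Claim_equal_countWordsLongerThan := by
  intro s _
  show countWordsLongerThan s = countWordsLongerThan_alt s
  unfold countWordsLongerThan countWordsLongerThan_alt
  rw [pvCnt_eq_foldl s.toList 0 0, zero_add, pvCnt_eq_sum s.toList 0 le_rfl]
  have hsep : (" ".toList : List Char) = [' '] := rfl
  rw [hsep, pv_splitOn_eq]
  cases hw : pvW s.toList with
  | nil => exact absurd hw (pvW_ne_nil s.toList)
  | cons h t => simp
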